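-- pv_equiv track=rewrite | github.com/CharlesR-W/SET_Thesis | SET_THESIS/TabularSingleClear/SingleBidDA_Continuous_DEP2.py | bids_arr_to_xy
-- ===== SOURCE A (Python) =====
-- def bids_arr_to_xy(bids_arr):
--     #bid format is (Q,P,N,Q)
--     x = []
--     y = []
--     Q_accepted_idx = 3
--     Q_bid_idx = 0
--     P_idx = 1
--     agent_idx = 2
--     x.append(0)
--     y.append(0)
--
--     Q_dispatched = 0
--     for QPNQ in bids_arr:
--         x.append(Q_dispatched)
--         P = QPNQ[P_idx]
--         y.append(P)
--
--         Q_dispatched += QPNQ[Q_bid_idx]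
--
--         x.append(Q_dispatched)
--         y.append(P)
--
--     return x,y
-- ===== SOURCE B (Python) =====
-- def bids_arr_to_xy(bids_arr):
--     # Build a prefix-sum table of bid quantities once, then construct the
--     # coordinates by indexing into that table (and into bids_arr) by position.
--     cum = []
--     total = 0
--     for b in bids_arr:
--         total += b[0]
--         cum.append(total)
--     n = len(bids_arr)
--     x = [0] + [v for i in range(n) for v in ((cum[i - 1] if i > 0 else 0), cum[i])]
--     y = [0] + [v for i in range(n) for v in (bids_arr[i][1], bids_arr[i][1])]
--     return x, y
-- ===== Notes on version B (the rewrite author's own statement) =====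
-- stated objective: alternative
-- what changed: Replaces the inline running accumulator with interleaved appends by a precomputed prefix-sum table read by index in comprehensions that build x and y separately.
import Mathlib
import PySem

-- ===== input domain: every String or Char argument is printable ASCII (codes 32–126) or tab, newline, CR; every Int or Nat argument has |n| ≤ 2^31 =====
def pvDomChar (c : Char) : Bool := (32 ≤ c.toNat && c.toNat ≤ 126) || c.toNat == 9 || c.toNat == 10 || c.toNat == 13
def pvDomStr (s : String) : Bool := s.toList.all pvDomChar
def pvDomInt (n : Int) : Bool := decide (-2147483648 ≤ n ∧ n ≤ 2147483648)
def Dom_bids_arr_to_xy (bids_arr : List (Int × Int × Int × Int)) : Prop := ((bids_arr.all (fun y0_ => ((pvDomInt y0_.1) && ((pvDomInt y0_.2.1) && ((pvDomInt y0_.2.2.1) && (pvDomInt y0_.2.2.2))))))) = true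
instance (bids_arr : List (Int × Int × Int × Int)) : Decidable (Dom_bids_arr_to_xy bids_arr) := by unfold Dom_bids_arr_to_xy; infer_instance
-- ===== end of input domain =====

-- B replaces A's inline running accumulator with a precomputed prefix-sum table
-- read by index; objective: alternative decomposition (same cost).


-- ===== PORT A =====
def bids_arr_to_xy (bids_arr : List (Int × Int × Int × Int)) : List Int × List Int :=
  let st := bids_arr.foldl
    (fun (acc : List Int × List Int × Int) QPNQ =>
      let x := acc.1 ++ [acc.2.2]
      let P := QPNQ.2.1
      let y := acc.2.1 ++ [P]
      let q := acc.2.2 + QPNQ.1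
      (x ++ [q], y ++ [P], q))
    ([0], [0], 0)
  (st.1, st.2.1)

-- ===== PORT B =====
def bids_arr_to_xy_alt (bids_arr : List (Int × Int × Int × Int)) : List Int × List Int :=
  let cum := (bids_arr.foldl
    (fun (acc : List Int × Int) b =>
      let total := acc.2 + b.1
      (acc.1 ++ [total], total)) ([], 0)).1
  let n := bids_arr.length
  -- cum[i] / bids_arr[i] indices are always in range here, so getD is exact
  let x := 0 :: (List.range n).flatMap
    (fun i => [if 0 < i then cum.getD (i - 1) 0 else 0, cum.getD i 0])
  let y := 0 :: (List.range n).flatMap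
    (fun i => [(bids_arr.getD i (0, 0, 0, 0)).2.1, (bids_arr.getD i (0, 0, 0, 0)).2.1])
  (x, y)

-- ===== PRECONDITION & SPEC =====
def Spec_bids_arr_to_xy (bids_arr : List (Int × Int × Int × Int)) (out : List Int × List Int) : Prop := out = bids_arr_to_xy_alt bids_arr
instance (bids_arr : List (Int × Int × Int × Int)) (out : List Int × List Int) : Decidable (Spec_bids_arr_to_xy bids_arr out) := by unfold Spec_bids_arr_to_xy; infer_instance

-- ===== CLAIM (what is proved, stated in full; the proofs are below) =====
def Claim_equal_bids_arr_to_xy : Prop := ∀ (bids_arr : List (Int × Int × Int × Int)), Dom_bids_arr_to_xy bids_arr → Spec_bids_arr_to_xy bids_arr (bids_arr_to_xy bids_arr)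

-- ===== LEMMAS AND PROOFS =====

-- canonical forms of both sides
def specCum : List (Int × Int × Int × Int) → Int → List Int
  | [], _ => []
  | b :: t, q => (q + b.1) :: specCum t (q + b.1)

def specXl : List (Int × Int × Int × Int) → Int → Int → List Int
  | [], _, _ => []
  | b :: t, q, low => low :: (q + b.1) :: specXl t (q + b.1) (q + b.1)

def specY : List (Int × Int × Int × Int) → List Int
  | [] => []
  | b :: t => b.2.1 :: b.2.1 :: specY t

lemma foldA_eq (bids : List (Int × Int × Int × Int)) :
    ∀ (x y : List Int) (q : Int),
    bids.foldl
      (fun (acc : List Int × List Int × Int) QPNQ =>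
        let x := acc.1 ++ [acc.2.2]
        let P := QPNQ.2.1
        let y := acc.2.1 ++ [P]
        let q := acc.2.2 + QPNQ.1
        (x ++ [q], y ++ [P], q))
      (x, y, q)
    = (x ++ specXl bids q q, y ++ specY bids,
       q + (bids.map (fun b => b.1)).sum) := by
  induction bids with
  | nil => intro x y q; simp [specXl, specY]
  | cons b t ih =>
      intro x y q
      simp only [List.foldl_cons, ih, specXl, specY, List.map_cons, List.sum_cons]
      simp [Prod.ext_iff, List.append_assoc]
      ring

lemma foldCum_eq (bids : List (Int × Int × Int × Int)) :
    ∀ (l : List Int) (t : Int),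
    bids.foldl
      (fun (acc : List Int × Int) b =>
        let total := acc.2 + b.1
        (acc.1 ++ [total], total)) (l, t)
    = (l ++ specCum bids t, t + (bids.map (fun b => b.1)).sum) := by
  induction bids with
  | nil => intro l t; simp [specCum]
  | cons b tl ih =>
      intro l t
      simp only [List.foldl_cons, ih, specCum, List.map_cons, List.sum_cons]
      simp [Prod.ext_iff, List.append_assoc]
      ring

lemma rangeX_eq (bids : List (Int × Int × Int × Int)) :
    ∀ (q low : Int),
    (List.range bids.length).flatMap
      (fun i => [if 0 < i then (specCum bids q).getD (i - 1) 0 else low,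
                 (specCum bids q).getD i 0])
    = specXl bids q low := by
  induction bids with
  | nil => intro q low; simp [specXl]
  | cons b t ih =>
      intro q low
      have hr : List.range (t.length + 1) = 0 :: (List.range t.length).map Nat.succ :=
        List.range_succ_eq_map
      simp only [List.length_cons, hr, List.flatMap_cons, List.flatMap_map, Nat.succ_eq_add_one,
        specCum, specXl]
      have : ((List.range t.length).flatMap
          (fun i => [if 0 < i + 1 then ((q + b.1) :: specCum t (q + b.1)).getD (i + 1 - 1) 0 else low,
                     ((q + b.1) :: specCum t (q + b.1)).getD (i + 1) 0]))
          = (List.range t.length).flatMap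
            (fun i => [if 0 < i then (specCum t (q + b.1)).getD (i - 1) 0 else (q + b.1),
                       (specCum t (q + b.1)).getD i 0]) := by
        apply List.flatMap_congr
        intro i _
        rcases i with _ | j <;> simp
      simp only [this, ih]
      simp

lemma rangeY_eq (bids : List (Int × Int × Int × Int)) :
    (List.range bids.length).flatMap
      (fun i => [(bids.getD i (0, 0, 0, 0)).2.1, (bids.getD i (0, 0, 0, 0)).2.1])
    = specY bids := by
  induction bids with
  | nil => simp [specY]
  | cons b t ih =>
      have hr : List.range (t.length + 1) = 0 :: (List.range t.length).map Nat.succ :=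
        List.range_succ_eq_map
      simp only [List.length_cons, hr, List.flatMap_cons, List.flatMap_map, Nat.succ_eq_add_one,
        specY]
      have : ((List.range t.length).flatMap
          (fun i => [((b :: t).getD (i + 1) (0, 0, 0, 0)).2.1,
                     ((b :: t).getD (i + 1) (0, 0, 0, 0)).2.1]))
          = (List.range t.length).flatMap
            (fun i => [(t.getD i (0, 0, 0, 0)).2.1, (t.getD i (0, 0, 0, 0)).2.1]) := by
        apply List.flatMap_congr
        intro i _
        simp
      simp only [this, ih]
      simp

-- ===== VERDICT (by name: the statement is the Claim_ definition above) =====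
theorem bids_arr_to_xy_spec : Claim_equal_bids_arr_to_xy := by
  intro bids _
  unfold Spec_bids_arr_to_xy bids_arr_to_xy bids_arr_to_xy_alt
  simp only [foldA_eq, foldCum_eq, rangeY_eq, List.nil_append, rangeX_eq]
  simp
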